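-- pv_equiv track=rewrite | github.com/vishal2376/after-install | .config/sublime-text/Packages/EasyClangComplete/plugin/error_vis/popups.py | cleanup_comment
-- ===== SOURCE A (Python) =====
-- def cleanup_comment(raw_comment):
--     """Cleanup raw doxygen comment."""
--     def pop_prepending_empty_lines(lines):
--         first_non_empty_line_idx = 0
--         for line in lines:
--             if line == '':
--                 first_non_empty_line_idx += 1
--             else:
--                 break
--         return lines[first_non_empty_line_idx:]
--
--     import string
--     lines = raw_comment.split('\n')
--     chars_to_strip = '/' + '*' + '!' + string.whitespace
--     lines = [line.lstrip(chars_to_strip) for line in lines]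
--     lines = pop_prepending_empty_lines(lines)
--     clean_lines = []
--     is_brief_comment = True
--     for line in lines:
--         if line == '' and is_brief_comment:
--             # Skip lines that belong to brief comment.
--             is_brief_comment = False
--             continue
--         if is_brief_comment:
--             continue
--         clean_lines.append(line)
--     return '\n'.join(clean_lines)
-- ===== SOURCE B (Python) =====
-- def cleanup_comment(raw_comment):
--     """Cleanup raw doxygen comment."""
--     import string
--     strip_chars = '/*!' + string.whitespace
--     lines = [line.lstrip(strip_chars) for line in raw_comment.split('\n')]
--     while lines and lines[0] == '':
--         lines.pop(0)
--     try:
--         sep = lines.index('')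
--     except ValueError:
--         return ''
--     return '\n'.join(lines[sep + 1:])
-- ===== Notes on version B (the rewrite author's own statement) =====
-- stated objective: simpler
-- what changed: Replaces A's stateful is_brief_comment flag loop (plus the counting-and-slice helper for leading blanks) by popping leading empty lines and then locating the brief/body separator directly with lines.index, joining the slice after it, and returning an empty string when no separator blank line exists.
import Mathlib
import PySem

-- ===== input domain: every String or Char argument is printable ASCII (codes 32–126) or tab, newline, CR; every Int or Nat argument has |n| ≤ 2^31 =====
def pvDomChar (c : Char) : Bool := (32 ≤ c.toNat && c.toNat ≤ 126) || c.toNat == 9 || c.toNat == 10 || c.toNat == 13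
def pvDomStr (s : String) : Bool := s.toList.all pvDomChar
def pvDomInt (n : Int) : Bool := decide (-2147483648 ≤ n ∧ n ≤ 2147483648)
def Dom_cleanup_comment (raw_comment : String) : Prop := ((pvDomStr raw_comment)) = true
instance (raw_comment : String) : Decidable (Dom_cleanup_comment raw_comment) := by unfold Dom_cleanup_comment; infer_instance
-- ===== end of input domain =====

-- B replaces A's stateful is_brief_comment flag loop by locating the brief/body
-- separator blank line directly with list.index and slicing off everything after it (objective: simpler).

-- '/' + '*' + '!' + string.whitespace  (string.whitespace = ' \t\n\r\x0b\x0c')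
def pvStripChars : List Char := ['/', '*', '!', ' ', '\t', '\n', '\r', Char.ofNat 11, Char.ofNat 12]

-- ===== PORT A =====
-- line.lstrip(chars): drop leading characters occurring in chars (exact port of str.lstrip with an argument)
def pvLstripA (l : List Char) : List Char := l.dropWhile (fun c => c ∈ pvStripChars)

-- the for/break counter loop of pop_prepending_empty_lines
def pvFirstNonEmptyIdx : List (List Char) → Int
  | [] => 0
  | l :: ls => if l = [] then 1 + pvFirstNonEmptyIdx ls else 0

def pvPopPrependingEmptyLines (lines : List (List Char)) : List (List Char) :=
  PySem.List.slice lines (some (pvFirstNonEmptyIdx lines)) none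

-- one iteration of A's flag loop; state = (clean_lines, is_brief_comment)
def pvBriefStep (st : List (List Char) × Bool) (line : List Char) : List (List Char) × Bool :=
  if line = [] ∧ st.2 = true then (st.1, false)
  else if st.2 = true then st
  else (st.1 ++ [line], st.2)

def cleanup_comment (raw_comment : String) : String :=
  let lines := (PySem.Chars.splitOn raw_comment.toList ['\n']).map pvLstripA
  let lines := pvPopPrependingEmptyLines lines
  let r := lines.foldl pvBriefStep ([], true)
  String.ofList (PySem.Chars.join ['\n'] r.1)

-- ===== PORT B =====
-- the 'while lines and lines[0] == "": lines.pop(0)' loop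
def pvDropLeadingEmpty : List (List Char) → List (List Char)
  | [] => []
  | l :: ls => if l = [] then pvDropLeadingEmpty ls else l :: ls

def cleanup_comment_alt (raw_comment : String) : String :=
  let lines := (PySem.Chars.splitOn raw_comment.toList ['\n']).map
      pvLstripA
  let lines := pvDropLeadingEmpty lines
  match PySem.List.index? lines ([] : List Char) with
  | none => ""
  | some sep =>
      String.ofList (PySem.Chars.join ['\n'] (PySem.List.slice lines (some ((sep : Int) + 1)) none))

-- ===== PRECONDITION & SPEC =====
def Spec_cleanup_comment (raw_comment : String) (out : String) : Prop := out = cleanup_comment_alt raw_comment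
instance (raw_comment : String) (out : String) : Decidable (Spec_cleanup_comment raw_comment out) := by unfold Spec_cleanup_comment; infer_instance

-- ===== CLAIM (what is proved, stated in full; the proofs are below) =====
def Claim_equal_cleanup_comment : Prop := ∀ (raw_comment : String), Dom_cleanup_comment raw_comment → Spec_cleanup_comment raw_comment (cleanup_comment raw_comment)

-- ===== LEMMAS AND PROOFS =====

theorem pvFirstNonEmptyIdx_nonneg (ls : List (List Char)) : 0 ≤ pvFirstNonEmptyIdx ls := by
  induction ls with
  | nil => simp [pvFirstNonEmptyIdx]
  | cons l ls ih => simp [pvFirstNonEmptyIdx]; split <;> omega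

theorem pop_eq_dropLeading (ls : List (List Char)) :
    pvPopPrependingEmptyLines ls = pvDropLeadingEmpty ls := by
  induction ls with
  | nil => rfl
  | cons l ls ih =>
    unfold pvPopPrependingEmptyLines pvFirstNonEmptyIdx pvDropLeadingEmpty
    have h0 := pvFirstNonEmptyIdx_nonneg ls
    by_cases h : l = []
    · rw [if_pos h, if_pos h, PySem.List.slice_from _ (by omega)]
      have ht : (1 + pvFirstNonEmptyIdx ls).toNat = (pvFirstNonEmptyIdx ls).toNat + 1 := by omega
      rw [ht, List.drop_succ_cons, ← ih]
      unfold pvPopPrependingEmptyLines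
      rw [PySem.List.slice_from _ h0]
    · rw [if_neg h, if_neg h, PySem.List.slice_from _ (by omega)]
      rfl

theorem brief_false (ls : List (List Char)) (acc : List (List Char)) :
    ls.foldl pvBriefStep (acc, false) = (acc ++ ls, false) := by
  induction ls generalizing acc with
  | nil => simp
  | cons l ls ih =>
    simp only [List.foldl_cons]
    have : pvBriefStep (acc, false) l = (acc ++ [l], false) := by
      simp [pvBriefStep]
    rw [this, ih]
    simp

theorem brief_true (ls : List (List Char)) :
    (ls.foldl pvBriefStep ([], true)).1 =
      (match PySem.List.index? ls ([] : List Char) with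
       | none => ([] : List (List Char))
       | some sep => ls.drop (sep + 1)) := by
  induction ls with
  | nil => simp [PySem.List.index?]
  | cons l ls ih =>
    by_cases h : l = []
    · subst h
      rw [PySem.List.index?_cons_self]
      simp only [List.foldl_cons]
      have : pvBriefStep ([], true) [] = ([], false) := by simp [pvBriefStep]
      rw [this, brief_false]
      simp
    · rw [PySem.List.index?_cons_of_ne _ h]
      simp only [List.foldl_cons]
      have : pvBriefStep ([], true) l = ([], true) := by simp [pvBriefStep, h]
      rw [this, ih]
      cases PySem.List.index? ls ([] : List Char) <;> simp

-- ===== VERDICT (by name: the statement is the Claim_ definition above) =====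
theorem cleanup_comment_spec : Claim_equal_cleanup_comment := by
  intro raw _
  simp only [Spec_cleanup_comment, cleanup_comment, cleanup_comment_alt]
  rw [pop_eq_dropLeading, brief_true]
  cases hidx : PySem.List.index?
      (pvDropLeadingEmpty ((PySem.Chars.splitOn raw.toList ['\n']).map pvLstripA))
      ([] : List Char) with
  | none => simp only [hidx]; rfl
  | some sep =>
    simp only [hidx]
    have hc : ((sep : Int) + 1) = ((sep + 1 : Nat) : Int) := by push_cast; ring
    rw [hc, PySem.List.slice_from _ (by positivity), Int.toNat_natCast]
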